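-- pv_equiv track=rewrite | github.com/pranavi-jain/random-QC | measure_circuit.py | get_standard_basis_list
-- ===== SOURCE A (Python) =====
-- def get_standard_basis_list(runs, num_q):
--     basis_list = []
--     bases = ["X", "Y", "Z"]
--     for i in range(runs):
--         current_basis = bases[i % len(bases)]
--         basis_string = current_basis * num_q
--         basis_list.append(basis_string)
--     return basis_list
-- ===== SOURCE B (Python) =====
-- def get_standard_basis_list(runs, num_q):
--     n = max(runs, 0)
--     if n == 0:
--         return []
--     pattern = [b * num_q for b in ("X", "Y", "Z")]
--     q, r = divmod(n, 3)
--     return pattern * q + pattern[:r]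
-- ===== Notes on version B (the rewrite author's own statement) =====
-- stated objective: simpler
-- what changed: Replaces the per-run loop with modulo indexing by building the three basis strings once and producing the cyclic list as pattern replication (pattern * q) plus a remainder slice (pattern[:r]), with n = max(runs, 0) matching range's treatment of negative counts.
import Mathlib
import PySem

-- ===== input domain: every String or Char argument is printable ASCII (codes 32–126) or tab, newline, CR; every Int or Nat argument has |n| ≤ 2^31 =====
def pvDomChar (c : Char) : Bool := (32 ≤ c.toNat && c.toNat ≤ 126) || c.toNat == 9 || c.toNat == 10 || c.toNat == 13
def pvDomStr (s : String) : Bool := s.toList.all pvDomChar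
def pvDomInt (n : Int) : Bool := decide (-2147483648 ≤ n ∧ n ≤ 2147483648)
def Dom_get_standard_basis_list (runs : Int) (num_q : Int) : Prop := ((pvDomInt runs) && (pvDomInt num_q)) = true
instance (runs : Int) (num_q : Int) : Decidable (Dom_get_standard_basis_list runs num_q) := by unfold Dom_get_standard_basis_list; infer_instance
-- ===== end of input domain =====

-- B builds the three basis strings once and forms the cyclic list by replication plus a remainder
-- slice instead of A's per-run loop with modulo indexing; objective: simpler.


-- Python 's * n' on strings (exact: empty for n ≤ 0)
def pyStrMul (s : String) (n : Int) : String :=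
  String.ofList (PySem.List.pyRepeat s.toList n)

-- ===== PORT A =====
def get_standard_basis_list (runs : Int) (num_q : Int) : List String :=
  let bases : List String := ["X", "Y", "Z"]
  (PySem.List.pyRange 0 runs 1).foldl
    (fun basis_list i =>
      let current_basis := PySem.List.pyGetD bases (PySem.Int.mod i (bases.length : Int)) ""
      let basis_string := pyStrMul current_basis num_q
      basis_list ++ [basis_string]) []

-- ===== PORT B =====
def get_standard_basis_list_alt (runs : Int) (num_q : Int) : List String :=
  let n := max runs 0
  if n = 0 then []
  else
    let pattern := ["X", "Y", "Z"].map (fun b => pyStrMul b num_q)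
    let q := PySem.Int.floordiv n 3
    let r := PySem.Int.mod n 3
    PySem.List.pyRepeat pattern q ++ PySem.List.slice pattern none (some r)

-- ===== PRECONDITION & SPEC =====
def Spec_get_standard_basis_list (runs : Int) (num_q : Int) (out : List String) : Prop := out = get_standard_basis_list_alt runs num_q
instance (runs : Int) (num_q : Int) (out : List String) : Decidable (Spec_get_standard_basis_list runs num_q out) := by unfold Spec_get_standard_basis_list; infer_instance

-- ===== CLAIM (what is proved, stated in full; the proofs are below) =====
def Claim_equal_get_standard_basis_list : Prop := ∀ (runs : Int) (num_q : Int), Dom_get_standard_basis_list runs num_q → Spec_get_standard_basis_list runs num_q (get_standard_basis_list runs num_q)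

-- ===== LEMMAS AND PROOFS =====

-- cycling through a 3-element list is replication plus a remainder prefix
lemma cycle3 {α : Type} (a b c d : α) (n : Nat) :
    (List.range n).map (fun k => [a, b, c].getD (k % 3) d)
      = (List.replicate (n / 3) [a, b, c]).flatten ++ [a, b, c].take (n % 3) := by
  induction n with
  | zero => simp
  | succ n ih =>
    rw [List.range_succ, List.map_append, ih]
    have h3 : n % 3 = 0 ∨ n % 3 = 1 ∨ n % 3 = 2 := by omega
    rcases h3 with h | h | h
    · have hq : (n + 1) / 3 = n / 3 := by omega
      have hr : (n + 1) % 3 = 1 := by omega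
      simp [h, hq, hr]
    · have hq : (n + 1) / 3 = n / 3 := by omega
      have hr : (n + 1) % 3 = 2 := by omega
      simp [h, hq, hr]
    · have hq : (n + 1) / 3 = n / 3 + 1 := by omega
      have hr : (n + 1) % 3 = 0 := by omega
      simp [h, hq, hr, List.replicate_succ' (n := n / 3), List.flatten_append]

-- ===== VERDICT (by name: the statement is the Claim_ definition above) =====
theorem get_standard_basis_list_spec : Claim_equal_get_standard_basis_list := by
  intro runs num_q _
  unfold Spec_get_standard_basis_list get_standard_basis_list get_standard_basis_list_alt
  set N : Nat := runs.toNat with hN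
  have hmax : max runs 0 = (N : Int) := by omega
  have hdiv : PySem.Int.floordiv (N : Int) 3 = ((N / 3 : Nat) : Int) := by
    rw [PySem.Int.floordiv, Int.fdiv_eq_ediv]; omega
  have hmod : PySem.Int.mod (N : Int) 3 = ((N % 3 : Nat) : Int) := by
    rw [PySem.Int.mod, Int.fmod_eq_emod]; omega
  dsimp only
  rw [hmax]
  by_cases hz : (N : Int) = 0
  · have hr0 : runs ≤ 0 := by omega
    rw [if_pos hz, PySem.List.pyRange_one_eq_nil hr0]
    rfl
  · rw [if_neg hz, hdiv, hmod]
    rw [PySem.List.pyRange_one, List.foldl_map, PySem.List.foldl_append_singleton_eq_map]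
    rw [PySem.List.slice_to_natCast]
    have hrep : PySem.List.pyRepeat (["X", "Y", "Z"].map (fun b => pyStrMul b num_q)) ((N / 3 : Nat) : Int)
        = (List.replicate (N / 3) (["X", "Y", "Z"].map (fun b => pyStrMul b num_q))).flatten := by
      simp [PySem.List.pyRepeat]
      congr 1
    rw [hrep]
    have heq : ∀ k : Nat,
        pyStrMul (PySem.List.pyGetD ["X", "Y", "Z"] (PySem.Int.mod ((0 : Int) + k) ((["X", "Y", "Z"] : List String).length : Int)) "") num_q
          = (["X", "Y", "Z"].map (fun b => pyStrMul b num_q)).getD (k % 3) "" := by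
      intro k
      have hm : PySem.Int.mod ((0 : Int) + k) ((["X", "Y", "Z"] : List String).length : Int) = ((k % 3 : Nat) : Int) := by
        rw [PySem.Int.mod, Int.fmod_eq_emod]; simp
      rw [hm, PySem.List.pyGetD_natCast]
      have : k % 3 < 3 := by omega
      interval_cases h : k % 3 <;> simp
    rw [List.nil_append]
    refine (List.map_congr_left fun k _ => heq k).trans ?_
    simp only [List.map_cons, List.map_nil, Int.sub_zero, ← hN]
    rw [cycle3]
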